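-- pv_equiv track=rewrite | github.com/piruty/atcoder | atcoder_beginner_contest/abc_022A.py | execute
-- ===== SOURCE A (Python) =====
-- def execute(N, S, T, WA):
--     WB = 0
--     count = 0
--     for a in WA:
--         WB += a
--         if S <= WB <= T:
--             count += 1
--     return count
-- ===== SOURCE B (Python) =====
-- def execute(N, S, T, WA):
--     # Divide and conquer: go(seg, S, T) returns (sum(seg), number of prefix
--     # sums of seg lying in [S, T]).  The right half is counted against the
--     # bounds shifted down by the left half's total, so no running prefix sum
--     # is ever carried across the list.
--     def go(seg, S, T):
--         if len(seg) == 0: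
--             return (0, 0)
--         if len(seg) == 1:
--             a = seg[0]
--             return (a, 1 if S <= a <= T else 0)
--         mid = len(seg) // 2
--         s1, c1 = go(seg[:mid], S, T)
--         s2, c2 = go(seg[mid:], S - s1, T - s1)
--         return (s1 + s2, c1 + c2)
--     return go(WA, S, T)[1]
-- ===== Notes on version B (the rewrite author's own statement) =====
-- stated objective: alternative
-- what changed: Replaces A's single fused accumulate-and-count loop by a divide-and-conquer recursion: each half is counted independently, with the right half's bounds shifted down by the left half's total, so no running prefix sum is carried.
import Mathlib
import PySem

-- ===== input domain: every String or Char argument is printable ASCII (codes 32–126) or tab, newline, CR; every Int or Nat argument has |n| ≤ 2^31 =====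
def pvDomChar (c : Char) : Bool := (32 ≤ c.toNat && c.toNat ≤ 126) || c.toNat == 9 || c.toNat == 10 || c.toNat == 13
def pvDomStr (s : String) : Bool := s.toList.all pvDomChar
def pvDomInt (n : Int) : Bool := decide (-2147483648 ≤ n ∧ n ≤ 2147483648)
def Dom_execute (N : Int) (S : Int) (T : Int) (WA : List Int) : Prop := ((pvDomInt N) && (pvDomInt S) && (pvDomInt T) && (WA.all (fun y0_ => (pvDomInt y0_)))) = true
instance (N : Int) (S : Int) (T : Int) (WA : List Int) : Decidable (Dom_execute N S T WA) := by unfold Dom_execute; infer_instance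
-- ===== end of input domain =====

-- B replaces A's fused accumulate-and-count loop by a divide-and-conquer recursion with shifted bounds (alternative algorithm; not claimed faster).

-- ===== PORT A =====
-- A: one fused loop carrying the running sum WB and the running count.
def execute (N : Int) (S : Int) (T : Int) (WA : List Int) : Int :=
  (WA.foldl (fun (st : Int × Int) a =>
      let wb := st.1 + a
      (wb, if S ≤ wb ∧ wb ≤ T then st.2 + 1 else st.2)) (0, 0)).2

-- ===== PORT B =====
-- Source B's go: returns (sum of seg, number of prefix sums of seg in [S,T]);
-- seg[:mid] / seg[mid:] with 0 ≤ mid ≤ len(seg) are exactly take/drop.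
def goDC : List Int → Int → Int → Int × Int
  | [], _, _ => (0, 0)
  | [a], S, T => (a, if S ≤ a ∧ a ≤ T then 1 else 0)
  | a :: b :: t, S, T =>
    let mid := (a :: b :: t).length / 2
    let p1 := goDC ((a :: b :: t).take mid) S T
    let p2 := goDC ((a :: b :: t).drop mid) (S - p1.1) (T - p1.1)
    (p1.1 + p2.1, p1.2 + p2.2)
termination_by seg _ _ => seg.length
decreasing_by
  · simp [List.length_take]; omega
  · simp [List.length_drop]; omega

def execute_alt (N : Int) (S : Int) (T : Int) (WA : List Int) : Int :=
  (goDC WA S T).2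

-- ===== PRECONDITION & SPEC =====
def Spec_execute (N : Int) (S : Int) (T : Int) (WA : List Int) (out : Int) : Prop := out = execute_alt N S T WA
instance (N : Int) (S : Int) (T : Int) (WA : List Int) (out : Int) : Decidable (Spec_execute N S T WA out) := by unfold Spec_execute; infer_instance

-- ===== CLAIM (what is proved, stated in full; the proofs are below) =====
def Claim_equal_execute : Prop := ∀ (N : Int) (S : Int) (T : Int) (WA : List Int), Dom_execute N S T WA → Spec_execute N S T WA (execute N S T WA)

-- ===== LEMMAS AND PROOFS =====

-- proof-side characterisation: number of prefix sums of the list in [S,T]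
def cnt : List Int → Int → Int → Int
  | [], _, _ => 0
  | a :: t, S, T => (if S ≤ a ∧ a ≤ T then 1 else 0) + cnt t (S - a) (T - a)

theorem cnt_append (l1 l2 : List Int) : ∀ S T : Int,
    cnt (l1 ++ l2) S T = cnt l1 S T + cnt l2 (S - l1.sum) (T - l1.sum) := by
  induction l1 with
  | nil => intro S T; simp [cnt]
  | cons a t ih =>
    intro S T
    simp only [List.cons_append, cnt, ih (S - a) (T - a), List.sum_cons]
    ring_nf

-- A's fused fold from state (wb, c) computes (wb + sum, c + cnt with shifted bounds)
theorem foldA_eq (S T : Int) (seg : List Int) : ∀ wb c : Int,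
    (seg.foldl (fun (st : Int × Int) a =>
        let x := st.1 + a
        (x, if S ≤ x ∧ x ≤ T then st.2 + 1 else st.2)) (wb, c))
      = (wb + seg.sum, c + cnt seg (S - wb) (T - wb)) := by
  induction seg with
  | nil => intro wb c; simp [cnt]
  | cons a t ih =>
    intro wb c
    simp only [List.foldl, cnt, List.sum_cons, ih]
    have h1 : S - wb ≤ a ∧ a ≤ T - wb ↔ S ≤ wb + a ∧ wb + a ≤ T := by omega
    rw [Prod.mk.injEq]
    refine ⟨by ring, ?_⟩
    rw [show S - wb - a = S - (wb + a) by ring, show T - wb - a = T - (wb + a) by ring]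
    by_cases h : S ≤ wb + a ∧ wb + a ≤ T
    · simp [h, h1.mpr h]; ring
    · simp [h]; omega

-- B's divide-and-conquer computes exactly (sum, cnt)
theorem goDC_eq_aux : ∀ (n : Nat) (seg : List Int), seg.length ≤ n →
    ∀ S T : Int, goDC seg S T = (seg.sum, cnt seg S T) := by
  intro n
  induction n with
  | zero =>
    intro seg h S T
    have hseg : seg = [] := by cases seg <;> simp_all
    subst hseg; simp [goDC, cnt]
  | succ n ih =>
    intro seg h S T
    match seg with
    | [] => simp [goDC, cnt]
    | [a] => simp [goDC, cnt]
    | a :: b :: t =>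
      have hlen : (a :: b :: t).length = t.length + 2 := by simp
      have h1 : ((a :: b :: t).take ((a :: b :: t).length / 2)).length ≤ n := by
        simp at h ⊢; omega
      have h2 : ((a :: b :: t).drop ((a :: b :: t).length / 2)).length ≤ n := by
        simp at h ⊢; omega
      have hsplit : (a :: b :: t).take ((a :: b :: t).length / 2) ++
          (a :: b :: t).drop ((a :: b :: t).length / 2) = a :: b :: t :=
        List.take_append_drop _ (a :: b :: t)
      have hsum : ((a :: b :: t).take ((a :: b :: t).length / 2)).sum +
          ((a :: b :: t).drop ((a :: b :: t).length / 2)).sum = (a :: b :: t).sum := by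
        rw [← List.sum_append, hsplit]
      have hcnt := cnt_append ((a :: b :: t).take ((a :: b :: t).length / 2))
        ((a :: b :: t).drop ((a :: b :: t).length / 2)) S T
      rw [hsplit] at hcnt
      simp only [goDC]
      rw [ih _ h1, ih _ h2, Prod.mk.injEq]
      exact ⟨hsum, by rw [hcnt]⟩

theorem goDC_eq (seg : List Int) (S T : Int) : goDC seg S T = (seg.sum, cnt seg S T) :=
  goDC_eq_aux seg.length seg le_rfl S T

-- ===== VERDICT (by name: the statement is the Claim_ definition above) =====
theorem execute_spec : Claim_equal_execute := by
  intro N S T WA _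
  unfold Spec_execute execute execute_alt
  rw [foldA_eq, goDC_eq]
  simp
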